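-- pv_equiv track=rewrite | github.com/Hungbui911/python_lesson | P102_Khai_can.py | find_x_y
-- ===== SOURCE A (Python) =====
-- import math
--
-- def find_x_y(n):
--     if n <= 0:
--         return -1, -1
--
--     max_x = int(math.isqrt(n))
--     for x in range(max_x, 0, -1):
--         can_x = x * x
--         if n % can_x == 0:
--             y = n // can_x
--             return x, y
--
--     return -1, -1
-- ===== SOURCE B (Python) =====
-- def find_x_y(n):
--     if n <= 0:
--         return -1, -1
--     x, m, p = 1, n, 2
--     while p * p <= m:
--         while m % (p * p) == 0:
--             m //= p * p
--             x *= p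
--         if m % p == 0:
--             m //= p
--         p += 1
--     return x, n // (x * x)
-- ===== Notes on version B (the rewrite author's own statement) =====
-- stated objective: alternative
-- what changed: B builds x by trial-division factorization (dividing out p*p repeatedly and stripping leftover single factors, so n/x^2 stays squarefree) instead of A's downward scan over candidate roots from isqrt(n).
import Mathlib
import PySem

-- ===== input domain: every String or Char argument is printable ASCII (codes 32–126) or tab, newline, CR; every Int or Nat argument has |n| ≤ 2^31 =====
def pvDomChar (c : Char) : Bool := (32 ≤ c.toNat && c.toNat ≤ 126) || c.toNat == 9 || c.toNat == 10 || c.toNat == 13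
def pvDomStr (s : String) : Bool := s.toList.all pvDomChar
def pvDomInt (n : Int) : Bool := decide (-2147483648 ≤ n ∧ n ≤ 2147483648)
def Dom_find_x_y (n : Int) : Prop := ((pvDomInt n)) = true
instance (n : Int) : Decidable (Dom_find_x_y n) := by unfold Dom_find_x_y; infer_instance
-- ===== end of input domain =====

-- B builds x by trial-division factorization (repeatedly dividing out p*p and stripping leftover single factors, so n/x^2 stays squarefree) instead of A's downward scan over candidate roots from isqrt(n).


-- ===== PORT A =====
-- the 'for x in range(max_x, 0, -1)' loop with its early return
def findXYLoopA (n : Int) : List Int → Int × Int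
  | [] => (-1, -1)
  | x :: xs =>
      let can_x := x * x
      if PySem.Int.mod n can_x = 0 then (x, PySem.Int.floordiv n can_x)
      else findXYLoopA n xs

def find_x_y (n : Int) : Int × Int :=
  if n ≤ 0 then (-1, -1)
  else
    -- int(math.isqrt(n)) = floor square root; Nat.sqrt is exact for n ≥ 0 (guaranteed by the guard)
    let max_x : Int := (Nat.sqrt n.toNat : Int)
    findXYLoopA n (PySem.List.pyRange max_x 0 (-1))

-- ===== PORT B =====
-- inner 'while m % (p*p) == 0: m //= p*p; x *= p' loop
-- (the fuel argument only makes the recursion total; fuel = m.toNat never runs out, see stripSq_spec)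
def stripSq (fuel : Nat) (p m x : Int) : Int × Int :=
  match fuel with
  | 0 => (m, x)
  | f + 1 =>
      if PySem.Int.mod m (p * p) = 0 then
        stripSq f p (PySem.Int.floordiv m (p * p)) (x * p)
      else (m, x)

-- the 'if m % p == 0: m //= p' step of the outer loop
def facStep (p m1 : Int) : Int :=
  if PySem.Int.mod m1 p = 0 then PySem.Int.floordiv m1 p else m1

-- outer 'while p*p <= m' loop (fuel again only for totality; it never runs out, see facLoopB_spec)
def facLoopB (fuel : Nat) (m x p : Int) : Int :=
  match fuel with
  | 0 => x
  | f + 1 =>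
      if p * p ≤ m then
        facLoopB f (facStep p (stripSq m.toNat p m x).1) (stripSq m.toNat p m x).2 (p + 1)
      else x

def find_x_y_alt (n : Int) : Int × Int :=
  if n ≤ 0 then (-1, -1)
  else
    let x := facLoopB (n.toNat + 2) n 1 2
    (x, PySem.Int.floordiv n (x * x))

-- ===== PRECONDITION & SPEC =====
def Spec_find_x_y (n : Int) (out : Int × Int) : Prop := out = find_x_y_alt n
instance (n : Int) (out : Int × Int) : Decidable (Spec_find_x_y n out) := by unfold Spec_find_x_y; infer_instance

-- ===== CLAIM (what is proved, stated in full; the proofs are below) =====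
def Claim_equal_find_x_y : Prop := ∀ (n : Int), Dom_find_x_y n → Spec_find_x_y n (find_x_y n)

-- ===== LEMMAS AND PROOFS =====

-- B's inner loop: with fuel ≥ m.toNat it pulls out a square factor k*k and leaves a
-- positive value not divisible by p*p (in particular the fuel never runs out)
theorem stripSq_spec (fuel : Nat) : ∀ (p m x : Int), 2 ≤ p → 0 < m → m.toNat ≤ fuel →
    ∃ k : Int, 1 ≤ k ∧ (stripSq fuel p m x).2 = x * k ∧
      m = (stripSq fuel p m x).1 * (k * k) ∧ 0 < (stripSq fuel p m x).1 ∧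
      ¬ ((p * p) ∣ (stripSq fuel p m x).1) := by
  induction fuel with
  | zero => intro p m x hp hm hf; omega
  | succ f ih =>
      intro p m x hp hm hf
      rw [stripSq]
      by_cases hmod : PySem.Int.mod m (p * p) = 0
      · rw [if_pos hmod]
        have hpp : (0:Int) < p * p := by nlinarith
        obtain ⟨c, hc⟩ := (PySem.Int.mod_eq_zero_iff_dvd m (p * p)).mp hmod
        have hdiv : PySem.Int.floordiv m (p * p) = c := by
          rw [PySem.Int.floordiv_eq_ediv_of_pos hpp, hc, Int.mul_ediv_cancel_left _ (by nlinarith)]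
        have hcpos : 0 < c := by nlinarith
        have hclt : c < m := by nlinarith
        rw [hdiv]
        obtain ⟨k, hk1, hk2, hk3, hk4, hk5⟩ := ih p c (x * p) hp hcpos (by omega)
        refine ⟨p * k, by nlinarith, ?_, ?_, hk4, hk5⟩
        · rw [hk2]; ring
        · rw [hc]; conv_lhs => rw [hk3]
          ring
      · rw [if_neg hmod]
        refine ⟨1, le_refl 1, by ring, by ring, hm, ?_⟩
        rw [← PySem.Int.mod_eq_zero_iff_dvd]; exact hmod

theorem facStep_le (p m1 : Int) (hp : 2 ≤ p) (hm : 0 < m1) :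
    facStep p m1 ≤ m1 ∧ 0 ≤ facStep p m1 := by
  unfold facStep
  split_ifs with hd
  · constructor
    · have := (PySem.Int.floordiv_lt_iff_lt_mul (a:=m1) (b:=p) (q:=m1) (by omega)).mpr
        (by nlinarith)
      omega
    · exact (PySem.Int.le_floordiv_iff_mul_le (a:=m1) (b:=p) (q:=0) (by omega)).mpr (by omega)
  · omega

-- B's outer loop: for m ≥ 1 whose prime factors are all ≥ p and enough fuel, it
-- multiplies the accumulator by some c with m = c·c·y and y squarefree
theorem facLoopB_spec (fuel : Nat) : ∀ (m x p : Int), 2 ≤ p → 0 < m →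
    (∀ q : ℕ, Nat.Prime q → (q : Int) ∣ m → p ≤ (q : Int)) →
    m.toNat + 2 ≤ fuel + p.toNat →
    ∃ c y : Int, facLoopB fuel m x p = x * c ∧ 1 ≤ c ∧ 1 ≤ y ∧ m = c * c * y ∧
      Squarefree y.toNat := by
  induction fuel with
  | zero =>
      intro m x p hp hm hinv hf
      rw [facLoopB]
      have hmp : m + 2 ≤ p := by omega
      have hppm : m < p * p := by nlinarith
      refine ⟨1, m, by ring, le_refl 1, by omega, by ring, ?_⟩
      rw [Nat.squarefree_iff_prime_squarefree]
      intro q hq hqd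
      have hqq : ((q * q : Nat) : Int) ∣ m := by
        have h' := Int.natCast_dvd_natCast.mpr hqd
        rwa [Int.toNat_of_nonneg (by omega)] at h'
      have hqm : (q : Int) ∣ m := dvd_trans (by exact_mod_cast Dvd.intro q rfl) hqq
      have h1 := hinv q hq hqm
      have h2 : ((q * q : Nat) : Int) ≤ m := Int.le_of_dvd hm hqq
      push_cast at h2
      nlinarith
  | succ f ih =>
      intro m x p hp hm hinv hf
      rw [facLoopB]
      by_cases hpm : p * p ≤ m
      · rw [if_pos hpm]
        obtain ⟨k, hk1, hk2, hk3, hm1pos, hk4⟩ :=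
          stripSq_spec m.toNat p m x hp hm (le_refl _)
        set m1 := (stripSq m.toNat p m x).1 with hm1def
        have hnd2 : ¬ (p : Int) ∣ facStep p m1 := by
          unfold facStep
          split_ifs with hd
          · obtain ⟨c0, hc0⟩ := (PySem.Int.mod_eq_zero_iff_dvd _ p).mp hd
            have hdiv : PySem.Int.floordiv m1 p = c0 := by
              rw [PySem.Int.floordiv_eq_ediv_of_pos (by omega), hc0,
                  Int.mul_ediv_cancel_left _ (by omega)]
            rw [hdiv]
            intro ⟨d, hdd⟩
            exact hk4 ⟨d, by rw [hc0, hdd]; ring⟩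
          · rw [PySem.Int.mod_eq_zero_iff_dvd] at hd
            exact hd
        have hstep_dvd : (facStep p m1) ∣ m1 := by
          unfold facStep
          split_ifs with hd
          · obtain ⟨c0, hc0⟩ := (PySem.Int.mod_eq_zero_iff_dvd _ p).mp hd
            have hdiv : PySem.Int.floordiv m1 p = c0 := by
              rw [PySem.Int.floordiv_eq_ediv_of_pos (by omega), hc0,
                  Int.mul_ediv_cancel_left _ (by omega)]
            rw [hdiv]
            exact ⟨p, by rw [hc0]; ring⟩
          · exact dvd_refl m1
        have hstep_pos : 0 < facStep p m1 := by
          obtain ⟨d, hd⟩ := hstep_dvd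
          rcases lt_trichotomy (facStep p m1) 0 with h' | h' | h'
          · exfalso
            have h0 := (facStep_le p m1 hp hm1pos).2
            omega
          · exfalso; rw [h'] at hd; simp at hd; omega
          · exact h'
        have hm1_dvd_m : m1 ∣ m := ⟨k * k, hk3⟩
        have hm1_le_m : m1 ≤ m := by
          nlinarith [mul_le_mul_of_nonneg_left (show (1:Int) ≤ k * k by nlinarith)
            (le_of_lt hm1pos)]
        have hinv2 : ∀ q : ℕ, Nat.Prime q → (q : Int) ∣ facStep p m1 → p + 1 ≤ (q : Int) := by
          intro q hq hqd
          have hqm : (q : Int) ∣ m := dvd_trans hqd (dvd_trans hstep_dvd hm1_dvd_m)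
          have h1 := hinv q hq hqm
          rcases lt_or_eq_of_le h1 with hlt | heq
          · omega
          · exfalso; exact hnd2 (heq ▸ hqd)
        have hfuel2 : (facStep p m1).toNat + 2 ≤ f + (p + 1).toNat := by
          have h1 := (facStep_le p m1 hp hm1pos).1
          have h2 : p ≤ m := by nlinarith
          omega
        obtain ⟨c, y, hB, hc1, hy1, hcy, hsf⟩ :=
          ih (facStep p m1) (stripSq m.toNat p m x).2 (p + 1) (by omega) hstep_pos hinv2 hfuel2
        by_cases hd : PySem.Int.mod m1 p = 0
        · -- a single leftover factor p was stripped; such a p is necessarily prime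
          obtain ⟨c0, hc0⟩ := (PySem.Int.mod_eq_zero_iff_dvd _ p).mp hd
          have hdiv : PySem.Int.floordiv m1 p = c0 := by
            rw [PySem.Int.floordiv_eq_ediv_of_pos (by omega), hc0,
                Int.mul_ediv_cancel_left _ (by omega)]
          have hstep_eq : facStep p m1 = c0 := by unfold facStep; rw [if_pos hd, hdiv]
          have hpm' : (p : Int) ∣ m := dvd_trans ⟨c0, hc0⟩ hm1_dvd_m
          have hpprime : Nat.Prime p.toNat := by
            obtain ⟨q, hqp, hqd⟩ := Nat.exists_prime_and_dvd (by omega : p.toNat ≠ 1)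
            have hqm : (q : Int) ∣ m := by
              have h' : (q : Int) ∣ (p.toNat : Int) := Int.natCast_dvd_natCast.mpr hqd
              rw [Int.toNat_of_nonneg (by omega)] at h'
              exact dvd_trans h' hpm'
            have h1 := hinv q hqp hqm
            have h2 : q ≤ p.toNat := Nat.le_of_dvd (by omega) hqd
            have h3 : q = p.toNat := by omega
            rwa [← h3]
          refine ⟨k * c, p * y, ?_, by nlinarith, by nlinarith, ?_, ?_⟩
          · rw [hB, hk2]; ring
          · conv_lhs => rw [hk3, hc0]
            rw [hstep_eq] at hcy
            conv_lhs => rw [hcy]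
            ring
          · have hpy : (p * y).toNat = p.toNat * y.toNat := by
              rw [Int.toNat_mul] <;> omega
            rw [hpy]
            refine Nat.squarefree_mul_iff.mpr ⟨?_, hpprime.squarefree, hsf⟩
            refine (Nat.Prime.coprime_iff_not_dvd hpprime).mpr ?_
            intro hdvd
            apply hnd2
            have h' : (p.toNat : Int) ∣ (y.toNat : Int) := Int.natCast_dvd_natCast.mpr hdvd
            rw [Int.toNat_of_nonneg (by omega), Int.toNat_of_nonneg (by omega)] at h'
            rw [hstep_eq]
            refine dvd_trans h' ?_
            rw [hstep_eq] at hcy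
            exact ⟨c * c, by rw [hcy]; ring⟩
        · have hstep_eq : facStep p m1 = m1 := by unfold facStep; rw [if_neg hd]
          rw [hstep_eq] at hcy
          refine ⟨k * c, y, ?_, by nlinarith, hy1, ?_, hsf⟩
          · rw [hB, hk2]; ring
          · conv_lhs => rw [hk3]
            conv_lhs => rw [hcy]
            ring
      · rw [if_neg hpm]
        have hppm : m < p * p := by omega
        refine ⟨1, m, by ring, le_refl 1, by omega, by ring, ?_⟩
        rw [Nat.squarefree_iff_prime_squarefree]
        intro q hq hqd
        have hqq : ((q * q : Nat) : Int) ∣ m := by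
          have h' := Int.natCast_dvd_natCast.mpr hqd
          rwa [Int.toNat_of_nonneg (by omega)] at h'
        have hqm : (q : Int) ∣ m := dvd_trans (by exact_mod_cast Dvd.intro q rfl) hqq
        have h1 := hinv q hq hqm
        have h2 : ((q * q : Nat) : Int) ≤ m := Int.le_of_dvd hm hqq
        push_cast at h2
        nlinarith

-- the greatest x ≤ k with n % (x*x) == 0 (x = 1 always works): the value A's downward scan returns
def bestDown (n : Int) : Nat → Int
  | 0 => 1
  | Nat.succ k =>
      if PySem.Int.mod n ((k + 1 : Nat) * (k + 1 : Nat) : Int) = 0 then ((k + 1 : Nat) : Int)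
      else bestDown n k

theorem bestDown_pos (n : Int) (k : Nat) : 1 ≤ bestDown n k := by
  induction k with
  | zero => simp [bestDown]
  | succ k ih =>
      simp only [bestDown]
      split_ifs with h
      · exact_mod_cast Nat.succ_le_succ (Nat.zero_le k)
      · exact ih

theorem bestDown_mod (n : Int) (k : Nat) :
    PySem.Int.mod n (bestDown n k * bestDown n k) = 0 := by
  induction k with
  | zero =>
      simp only [bestDown]
      rw [PySem.Int.mod_eq_zero_iff_dvd]
      simp
  | succ k ih =>
      simp only [bestDown]
      split_ifs with h
      · exact h
      · exact ih

theorem bestDown_max (n : Int) (k : Nat) :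
    ∀ z : Int, 1 ≤ z → z ≤ (k : Int) → PySem.Int.mod n (z * z) = 0 → z ≤ bestDown n k := by
  induction k with
  | zero => intro z h1 h2 _; omega
  | succ k ih =>
      intro z h1 h2 hz
      simp only [bestDown]
      split_ifs with h
      · push_cast at h2 ⊢; omega
      · rcases lt_or_ge z ((k : Int) + 1) with hlt | hge
        · exact ih z h1 (by omega) hz
        · exfalso; apply h
          have hze : z = ((k + 1 : Nat) : Int) := by push_cast; push_cast at h2; omega
          rw [← hze]; exact hz

-- any z with z·z ∣ c·c·y (y squarefree) satisfies z ≤ c: compare prime exponents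
theorem sq_dvd_le (c y z : Nat) (hc : 0 < c) (hy0 : 0 < y) (hy : Squarefree y)
    (hz0 : 0 < z) (hz : z * z ∣ c * c * y) : z ≤ c := by
  have hzc : z ∣ c := by
    rw [← Nat.factorization_le_iff_dvd (by omega) (by omega)]
    have hle := (Nat.factorization_le_iff_dvd (by positivity) (by positivity)).mpr hz
    intro p
    have h1 := hle p
    rw [Nat.factorization_mul (by omega) (by omega)] at h1
    rw [Nat.factorization_mul (by positivity) (by omega),
        Nat.factorization_mul (by omega) (by omega)] at h1
    have h2 := hy.natFactorization_le_one p
    simp only [Finsupp.add_apply] at h1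
    omega
  exact Nat.le_of_dvd hc hzc

-- a decomposition n = c·c·y with y squarefree pins down A's scan result
theorem bestDown_eq (n : Int) (hn : 0 < n) (c y : Int) (hc : 1 ≤ c) (hy : 1 ≤ y)
    (hcy : n = c * c * y) (hsf : Squarefree y.toNat) :
    bestDown n (Nat.sqrt n.toNat) = c := by
  set s := Nat.sqrt n.toNat with hs
  have hcs : c ≤ (s : Int) := by
    have h1 : c * c ≤ n := by nlinarith
    have h2 : c.toNat * c.toNat ≤ n.toNat := by
      zify
      rw [Int.toNat_of_nonneg (show (0:Int) ≤ c by omega),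
          Int.toNat_of_nonneg (show (0:Int) ≤ n by omega)]
      exact h1
    have h3 : c.toNat ≤ s := Nat.le_sqrt.mpr h2
    omega
  have hcmod : PySem.Int.mod n (c * c) = 0 :=
    (PySem.Int.mod_eq_zero_iff_dvd n (c * c)).mpr ⟨y, hcy⟩
  have hge : c ≤ bestDown n s := bestDown_max n s c hc hcs hcmod
  have hle : bestDown n s ≤ c := by
    set b := bestDown n s with hb
    have hb1 : 1 ≤ b := bestDown_pos n s
    have hbd : (b * b) ∣ n := (PySem.Int.mod_eq_zero_iff_dvd n (b * b)).mp (bestDown_mod n s)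
    have hnat : b.toNat * b.toNat ∣ c.toNat * c.toNat * y.toNat := by
      have h1 : ((b.toNat * b.toNat : Nat) : Int) ∣ ((n.toNat : Nat) : Int) := by
        push_cast
        rw [Int.toNat_of_nonneg (by omega), Int.toNat_of_nonneg (by omega)]
        exact hbd
      have h2 := Int.natCast_dvd_natCast.mp h1
      have h3 : n.toNat = c.toNat * c.toNat * y.toNat := by
        have : ((c.toNat * c.toNat * y.toNat : Nat) : Int) = n := by
          push_cast
          rw [Int.toNat_of_nonneg (by omega), Int.toNat_of_nonneg (by omega)]
          omega
        omega
      rwa [h3] at h2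
    have := sq_dvd_le c.toNat y.toNat b.toNat (by omega) (by omega) hsf (by omega) hnat
    omega
  omega

theorem loopA_eq_bestDown (n : Int) :
    ∀ k : Nat, 1 ≤ k →
      findXYLoopA n (PySem.List.pyRange (k : Int) 0 (-1)) =
        (bestDown n k, PySem.Int.floordiv n (bestDown n k * bestDown n k)) := by
  intro k hk
  induction k with
  | zero => omega
  | succ k ih =>
      have hc : ((k + 1 : Nat) : Int) = (k : Int) + 1 := by push_cast; ring
      have hb : bestDown n (k + 1) =
          if PySem.Int.mod n (((k : Int) + 1) * ((k : Int) + 1)) = 0 then (k : Int) + 1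
          else bestDown n k := by
        simp only [bestDown, hc]
      rw [hc, PySem.List.pyRange_neg_one_cons (by omega : (0 : Int) < (k : Int) + 1)]
      have h1 : (k : Int) + 1 - 1 = (k : Int) := by ring
      rw [h1]
      simp only [findXYLoopA, hb]
      split_ifs with hdvd
      · rfl
      · rcases Nat.eq_zero_or_pos k with h | h
        · exfalso
          apply hdvd
          subst h
          have : PySem.Int.mod n 1 = 0 := by
            rw [PySem.Int.mod_eq_emod_of_pos (by norm_num)]
            exact Int.emod_one n
          simpa using this
        · exact ih h

theorem find_x_y_eq (n : Int) : find_x_y n = find_x_y_alt n := by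
  by_cases hn : n ≤ 0
  · simp [find_x_y, find_x_y_alt, hn]
  · have h0 : 0 < n := by omega
    have hs1 : 1 ≤ Nat.sqrt n.toNat := by
      have h1 : 1 ≤ n.toNat := by omega
      calc 1 = Nat.sqrt 1 := rfl
        _ ≤ Nat.sqrt n.toNat := Nat.sqrt_le_sqrt h1
    obtain ⟨c, y, hB, hc1, hy1, hcy, hsf⟩ :=
      facLoopB_spec (n.toNat + 2) n 1 2 (le_refl 2) h0 (fun q hq _ => by
        have := hq.two_le
        exact_mod_cast this) (by omega)
    have hbd : bestDown n (Nat.sqrt n.toNat) = c := bestDown_eq n h0 c y hc1 hy1 hcy hsf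
    simp only [find_x_y, find_x_y_alt, if_neg hn]
    rw [loopA_eq_bestDown n (Nat.sqrt n.toNat) hs1, hbd, hB]
    simp

-- ===== VERDICT (by name: the statement is the Claim_ definition above) =====
theorem find_x_y_spec : Claim_equal_find_x_y := by
  intro n _
  unfold Spec_find_x_y
  exact find_x_y_eq n
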